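-- pv_equiv track=rewrite | github.com/xchen034/dyson_sphere_kg | modularity/knowledge_fusion/utils.py | get_tuples_dict
-- ===== SOURCE A (Python) =====
-- def get_tuples_dict(tuples):
--     entity = {}
--     relations = {}
--     for i in range(len(tuples)):
--         head, rel, tail = tuples[i]
--         if rel not in relations:
--             relations[rel] = len(relations)
--         if head not in entity:
--             entity[head] = len(entity)
--         if tail not in entity:
--             entity[tail] = len(entity)
--     return entity, relations
-- ===== SOURCE B (Python) =====
-- def get_tuples_dict(tuples):
--     ent_stream = [e for h, _, t in tuples for e in (h, t)]
--     rel_stream = [r for _, r, _ in tuples]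
--
--     def index_map(stream):
--         order = sorted(set(stream), key=stream.index)
--         return {x: i for i, x in enumerate(order)}
--
--     return index_map(ent_stream), index_map(rel_stream)
-- ===== Notes on version B (the rewrite author's own statement) =====
-- stated objective: alternative
-- what changed: Instead of A's single loop that grows two dicts with membership tests and len-valued insertions, B flattens the triples into an entity stream and a relation stream, takes the set of each, sorts the distinct keys by their first-occurrence position (sorted(set(stream), key=stream.index)) and numbers the sorted keys with enumerate.
import Mathlib
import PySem

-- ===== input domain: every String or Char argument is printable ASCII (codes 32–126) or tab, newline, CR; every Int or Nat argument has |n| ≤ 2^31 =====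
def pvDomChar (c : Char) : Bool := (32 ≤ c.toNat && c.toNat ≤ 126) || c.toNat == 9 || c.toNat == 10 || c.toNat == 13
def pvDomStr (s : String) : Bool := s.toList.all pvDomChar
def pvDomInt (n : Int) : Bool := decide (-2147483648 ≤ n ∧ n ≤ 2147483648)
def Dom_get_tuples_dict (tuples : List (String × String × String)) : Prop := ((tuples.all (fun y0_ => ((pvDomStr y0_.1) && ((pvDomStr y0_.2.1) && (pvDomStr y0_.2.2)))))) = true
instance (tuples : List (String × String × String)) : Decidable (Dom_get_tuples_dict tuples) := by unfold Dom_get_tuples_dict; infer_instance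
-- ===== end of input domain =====

-- B rebuilds each index dict by sorting the SET of keys by first-occurrence position and
-- enumerating, instead of A's single loop growing two dicts (objective: alternative; same result).

-- ===== PORT A =====
-- 'for i in range(len(tuples)): head, rel, tail = tuples[i]' iterates the list elements in
-- order; ported as a fold over the list (indexing is always in range here).
def get_tuples_dict (tuples : List (String × String × String)) : (List (String × Int)) × (List (String × Int)) :=
  let st := tuples.foldl
    (fun (st : PySem.Dict String Int × PySem.Dict String Int) tr =>
      let entity := st.1
      let relations := st.2
      let head := tr.1
      let rel := tr.2.1
      let tail := tr.2.2
      let relations := if relations.contains rel then relations else relations.insert rel (relations.size : Int)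
      let entity := if entity.contains head then entity else entity.insert head (entity.size : Int)
      let entity := if entity.contains tail then entity else entity.insert tail (entity.size : Int)
      (entity, relations))
    (PySem.Dict.empty, PySem.Dict.empty)
  (st.1.items, st.2.items)

-- ===== PORT B =====
-- order = sorted(set(stream), key=stream.index); {x: i for i, x in enumerate(order)}.
-- stream.index(x) always succeeds here (x is drawn from set(stream)), so the .getD 0
-- default of index? is never used; the key is injective on the set, so the sort does not
-- depend on Python's set-iteration order.
def pvIndexMap (stream : List String) : List (String × Int) :=
  let order := PySem.List.sorted (PySem.Set.ofList stream)
    (fun x => (PySem.List.index? stream x).getD 0) false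
  (PySem.List.enumerate order 0).map (fun p => (p.2, p.1))

def get_tuples_dict_alt (tuples : List (String × String × String)) : (List (String × Int)) × (List (String × Int)) :=
  let entStream := tuples.flatMap (fun tr => [tr.1, tr.2.2])
  let relStream := tuples.map (fun tr => tr.2.1)
  (pvIndexMap entStream, pvIndexMap relStream)

-- ===== PRECONDITION & SPEC =====
def Spec_get_tuples_dict (tuples : List (String × String × String)) (out : (List (String × Int)) × (List (String × Int))) : Prop := out = get_tuples_dict_alt tuples
instance (tuples : List (String × String × String)) (out : (List (String × Int)) × (List (String × Int))) : Decidable (Spec_get_tuples_dict tuples out) := by unfold Spec_get_tuples_dict; infer_instance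

-- ===== CLAIM (what is proved, stated in full; the proofs are below) =====
def Claim_equal_get_tuples_dict : Prop := ∀ (tuples : List (String × String × String)), Dom_get_tuples_dict tuples → Spec_get_tuples_dict tuples (get_tuples_dict tuples)

-- ===== LEMMAS AND PROOFS =====

-- {x: i for i, x in enumerate(L)} as a list of pairs.
def pvEnum (L : List String) : List (String × Int) :=
  (PySem.List.enumerate L 0).map (fun p => (p.2, p.1))

-- The insert-if-absent step of A, on one dict.
def pvStep (d : PySem.Dict String Int) (x : String) : PySem.Dict String Int :=
  if d.contains x then d else d.insert x (d.size : Int)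

lemma pvAny_fst_enumerate (L : List String) (n : Int) (x : String) :
    (((PySem.List.enumerate L n).map (fun p => (p.2, p.1))).any (fun p => p.1 == x)) = L.contains x := by
  induction L generalizing n with
  | nil => rfl
  | cons a L ih =>
    have hax : (a == x) = (decide (x = a)) := by
      rcases eq_or_ne x a with h | h
      · simp [h]
      · simp [h, beq_eq_false_iff_ne.mpr (Ne.symm h)]
    simp [PySem.List.enumerate, ih, hax]

lemma pvEnum_contains (L : List String) (x : String) :
    (PySem.Dict.mk (pvEnum L)).contains x = L.contains x := by
  simp only [PySem.Dict.contains, pvEnum]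
  exact pvAny_fst_enumerate L 0 x

lemma pvEnumerate_append_singleton (L : List String) (x : String) (n : Int) :
    PySem.List.enumerate (L ++ [x]) n = PySem.List.enumerate L n ++ [((n + L.length : Int), x)] := by
  induction L generalizing n with
  | nil => simp [PySem.List.enumerate]
  | cons a L ih => simp [PySem.List.enumerate, ih]; ring

lemma pvEnum_length (L : List String) : (pvEnum L).length = L.length := by
  calc (pvEnum L).length = (PySem.List.enumerate L 0).length := by simp [pvEnum]
    _ = ((PySem.List.enumerate L 0).map (fun p => p.2)).length := by simp
    _ = L.length := by rw [PySem.List.map_snd_enumerate]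

lemma pvStep_enum (L : List String) (x : String) :
    pvStep (PySem.Dict.mk (pvEnum L)) x = PySem.Dict.mk (pvEnum (PySem.Set.add L x)) := by
  unfold pvStep
  rw [pvEnum_contains]
  by_cases hm : x ∈ L
  · rw [if_pos (by simpa using hm)]
    simp [PySem.Set.add, PySem.Set.contains, hm, List.contains_eq_mem]
  · rw [if_neg (by simpa using hm)]
    unfold PySem.Dict.insert
    rw [pvEnum_contains, if_neg (by simpa using hm)]
    have hsz : ((PySem.Dict.mk (pvEnum L)).size : Int) = (L.length : Int) := by
      simp [PySem.Dict.size, pvEnum_length]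
    have hadd : PySem.Set.add L x = L ++ [x] := by
      simp [PySem.Set.add, PySem.Set.contains, List.contains_eq_mem, hm]
    rw [hadd]
    show PySem.Dict.mk (pvEnum L ++ [(x, ((PySem.Dict.mk (pvEnum L)).size : Int))]) = _
    rw [hsz]
    simp [pvEnum, pvEnumerate_append_singleton]

lemma pvFold_enum (xs : List String) (L : List String) :
    xs.foldl pvStep (PySem.Dict.mk (pvEnum L)) = PySem.Dict.mk (pvEnum (xs.foldl PySem.Set.add L)) := by
  induction xs generalizing L with
  | nil => rfl
  | cons x xs ih => rw [List.foldl_cons, pvStep_enum, ih, List.foldl_cons]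

-- A's paired loop splits into two independent folds over the field-wise streams.
lemma pvSplit (ts : List (String × String × String)) (d1 d2 : PySem.Dict String Int) :
    ts.foldl
      (fun (st : PySem.Dict String Int × PySem.Dict String Int) tr =>
        let entity := st.1
        let relations := st.2
        let head := tr.1
        let rel := tr.2.1
        let tail := tr.2.2
        let relations := if relations.contains rel then relations else relations.insert rel (relations.size : Int)
        let entity := if entity.contains head then entity else entity.insert head (entity.size : Int)
        let entity := if entity.contains tail then entity else entity.insert tail (entity.size : Int)
        (entity, relations))
      (d1, d2)
    = ((ts.flatMap (fun tr => [tr.1, tr.2.2])).foldl pvStep d1,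
       (ts.map (fun tr => tr.2.1)).foldl pvStep d2) := by
  induction ts generalizing d1 d2 with
  | nil => rfl
  | cons tr ts ih => simpa [pvStep] using ih (pvStep (pvStep d1 tr.1) tr.2.2) (pvStep d2 tr.2.1)

-- set(xs) in first-occurrence order is strictly increasing under xs.index.
lemma pvOfList_pairwise_idx (xs : List String) :
    (PySem.Set.ofList xs).Pairwise
      (fun a b => (PySem.List.index? xs a).getD 0 < (PySem.List.index? xs b).getD 0) := by
  induction xs with
  | nil => simp [PySem.Set.ofList]
  | cons x xs ih =>
    rw [PySem.Set.ofList_cons]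
    constructor
    · intro y hy
      have hmem := (PySem.Set.mem_discard (PySem.Set.ofList xs) x y).mp hy
      have hyx : y ≠ x := hmem.2
      have hyxs : y ∈ xs := (PySem.Set.mem_ofList xs y).mp hmem.1
      obtain ⟨k, hk⟩ := Option.isSome_iff_exists.mp ((PySem.List.index?_isSome_iff xs y).mpr hyxs)
      rw [PySem.List.index?_cons_self, PySem.List.index?_cons_of_ne xs (Ne.symm hyx), hk]
      simp
    · have hsub : (PySem.Set.discard (PySem.Set.ofList xs) x).Sublist (PySem.Set.ofList xs) := by
        simp [PySem.Set.discard]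
      refine List.Pairwise.imp_of_mem ?_ (ih.sublist hsub)
      intro a b ha hb hab
      have hax : a ≠ x := ((PySem.Set.mem_discard (PySem.Set.ofList xs) x a).mp ha).2
      have hbx : b ≠ x := ((PySem.Set.mem_discard (PySem.Set.ofList xs) x b).mp hb).2
      have haxs : a ∈ xs := (PySem.Set.mem_ofList xs a).mp ((PySem.Set.mem_discard (PySem.Set.ofList xs) x a).mp ha).1
      have hbxs : b ∈ xs := (PySem.Set.mem_ofList xs b).mp ((PySem.Set.mem_discard (PySem.Set.ofList xs) x b).mp hb).1
      obtain ⟨ka, hka⟩ := Option.isSome_iff_exists.mp ((PySem.List.index?_isSome_iff xs a).mpr haxs)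
      obtain ⟨kb, hkb⟩ := Option.isSome_iff_exists.mp ((PySem.List.index?_isSome_iff xs b).mpr hbxs)
      rw [PySem.List.index?_cons_of_ne xs (Ne.symm hax), PySem.List.index?_cons_of_ne xs (Ne.symm hbx), hka, hkb]
      rw [hka, hkb] at hab
      simpa using Nat.succ_lt_succ (by simpa using hab)

-- hence the sort by first index leaves the first-occurrence order unchanged.
lemma pvSorted_idx (xs : List String) :
    PySem.List.sorted (PySem.Set.ofList xs) (fun x => (PySem.List.index? xs x).getD 0) false
      = PySem.Set.ofList xs :=
  PySem.List.sorted_eq_of_perm_of_pairwise_lt (PySem.Set.ofList xs) (PySem.Set.ofList xs)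
    (fun x => (PySem.List.index? xs x).getD 0) (List.Perm.refl _) (pvOfList_pairwise_idx xs)

lemma pvIndexMap_eq (stream : List String) :
    pvIndexMap stream = pvEnum (PySem.Set.ofList stream) := by
  unfold pvIndexMap pvEnum
  rw [pvSorted_idx]

-- ===== VERDICT (by name: the statement is the Claim_ definition above) =====
theorem get_tuples_dict_spec : Claim_equal_get_tuples_dict := by
  intro tuples _
  unfold Spec_get_tuples_dict get_tuples_dict get_tuples_dict_alt
  have hempty : (PySem.Dict.empty : PySem.Dict String Int) = PySem.Dict.mk (pvEnum []) := rfl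
  rw [pvSplit, hempty, pvFold_enum, pvFold_enum]
  dsimp only
  rw [pvIndexMap_eq, pvIndexMap_eq]
  simp [PySem.Set.ofList_eq_foldl]
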